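-- pv_equiv track=rewrite | github.com/TrongNgoVan/Nam-3_Ky_1_Python_PTIT | CodePTIT/CodePTIT_Luyện Tập/PY01003_Lam_tron_so.py | rounded
-- ===== SOURCE A (Python) =====
-- def rounded (n):
--     if int(n) <= 10:
--         return n;
--     n = ' '.join(n).split()
--     for i in range(len(n)-1, 0, -1):
--         if n[i] >= '5':
--             n[i-1] = chr(ord(n[i-1]) + 1)
--         n[i] = '0'
--     if n[0] > '9':
--         n[0] = '10'
--     return ''.join(n)
-- ===== SOURCE B (Python) =====
-- def rounded(n):
--     if int(n) <= 10:
--         return n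
--     ds = ''.join(n.split())
--     # Carry reaches the leading digit iff, after the head, the first char that
--     # is not '4' exists and is >= '5' (a '4' forwards a carry unchanged).
--     tail = ds[1:].lstrip('4')
--     carry = 1 if tail and tail[0] >= '5' else 0
--     head = chr(ord(ds[0]) + carry)
--     if head > '9':
--         head = '10'
--     return head + '0' * (len(ds) - 1)
-- ===== Notes on version B (the rewrite author's own statement) =====
-- stated objective: simpler
-- what changed: Replaces A's right-to-left in-place mutation loop (chr/ord cell rewrites over a downward index range plus a join) with a loop-free closed form: the carry into the leading digit is 1 exactly when the tail, with its leading fours stripped, starts with a digit of five or more, so B is a one-character lstrip plus one comparison and direct string building.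
import Mathlib
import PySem

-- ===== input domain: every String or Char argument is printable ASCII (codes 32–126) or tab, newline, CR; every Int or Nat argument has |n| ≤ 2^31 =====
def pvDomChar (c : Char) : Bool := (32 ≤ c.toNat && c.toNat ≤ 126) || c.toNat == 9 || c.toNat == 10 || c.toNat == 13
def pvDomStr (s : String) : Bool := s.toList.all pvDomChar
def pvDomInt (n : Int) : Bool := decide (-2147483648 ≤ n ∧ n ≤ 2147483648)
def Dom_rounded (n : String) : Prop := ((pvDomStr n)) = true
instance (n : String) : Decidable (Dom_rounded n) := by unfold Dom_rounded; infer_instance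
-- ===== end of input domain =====

-- B replaces A's right-to-left in-place carry loop with a loop-free closed form: the carry into
-- the leading digit is read off by stripping leading '4's from the tail and testing its first char.

-- ===== PORT A =====
-- chr(ord(s) + 1) for a one-character string s; ord raises TypeError on other strings
-- (never reached by A: every mutated cell holds a single character while the loop runs).
def pyChrOrdSucc (s : List Char) : List Char :=
  match s with
  | [c] => [Char.ofNat (c.toNat + 1)]
  | _ => []

-- the body of A's 'for i in range(len(n)-1, 0, -1)' loop (cells are Python strings = List Char)
def roundedStep (l : List (List Char)) (i : Int) : List (List Char) :=
  let l' := if ['5'] ≤ PySem.List.pyGetD l i [] then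
      PySem.List.pySetD l (i - 1) (pyChrOrdSucc (PySem.List.pyGetD l (i - 1) [])) else l
  PySem.List.pySetD l' i ['0']

def rounded (n : String) : String :=
  match PySem.Int.ofStr? n with
  | none => ""      -- int(n) raises ValueError here; excluded by Pre_rounded
  | some v =>
    if v ≤ 10 then n
    else
      let l0 : List (List Char) :=
        PySem.Chars.split₀ (PySem.Chars.join [' '] (n.toList.map (fun c => [c])))
      let l1 := (PySem.List.pyRange ((l0.length : Int) - 1) 0 (-1)).foldl roundedStep l0
      let l2 := if ['9'] < PySem.List.pyGetD l1 0 [] then PySem.List.pySetD l1 0 ['1', '0'] else l1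
      String.ofList (PySem.Chars.join [] l2)

-- ===== PORT B =====
def rounded_alt (n : String) : String :=
  match PySem.Int.ofStr? n with
  | none => ""      -- int(n) raises ValueError here; excluded by Pre_rounded
  | some v =>
    if v ≤ 10 then n
    else
      let ds := PySem.Chars.join [] (PySem.Chars.split₀ n.toList)   -- ''.join(n.split())
      -- ds[1:].lstrip('4'): dropWhile (== '4') is exact for a one-character strip set
      let tail := (PySem.List.slice ds (some 1) none).dropWhile (fun c => c == '4')
      let carry : Nat := match tail with | [] => 0 | c :: _ => if '5' ≤ c then 1 else 0
      -- ds[0]: Pre_rounded guarantees ds ≠ [] (int(n) parses), so headD's default is never used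
      let head := Char.ofNat ((ds.headD '0').toNat + carry)
      let headS : List Char := if '9' < head then ['1', '0'] else [head]
      String.ofList (headS ++ List.replicate (ds.length - 1) '0')

-- ===== PRECONDITION & SPEC =====
-- Pre_: int(n) parses (A raises ValueError otherwise); the second conjunct (some character is
-- not whitespace) is implied by the first and is stated only to be directly checkable.
def Pre_rounded (n : String) : Prop :=
  (PySem.Int.ofStr? n).isSome = true ∧ n.toList.any (fun c => !PySem.Chars.isspace c) = true
instance (n : String) : Decidable (Pre_rounded n) := by unfold Pre_rounded; infer_instance

def pvWitness_rounded : String := "15"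

def Spec_rounded (n : String) (out : String) : Prop := out = rounded_alt n
instance (n : String) (out : String) : Decidable (Spec_rounded n out) := by unfold Spec_rounded; infer_instance

-- ===== CLAIM (what is proved, stated in full; the proofs are below) =====
def Claim_equal_rounded : Prop := ∀ (n : String), Dom_rounded n → Pre_rounded n → Spec_rounded n (rounded n)

-- ===== LEMMAS AND PROOFS =====

def carryF (l : List Char) : Nat :=
  l.foldr (fun c acc => if c.toNat + acc ≥ '5'.toNat then 1 else 0) 0

lemma carryF_nil : carryF [] = 0 := rfl

lemma carryF_cons (c : Char) (l : List Char) :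
    carryF (c :: l) = if 53 ≤ c.toNat + carryF l then 1 else 0 := by
  simp [carryF, ge_iff_le]

lemma carryF_le_one (l : List Char) : carryF l ≤ 1 := by
  cases l with
  | nil => simp [carryF_nil]
  | cons c l => rw [carryF_cons]; split <;> omega

lemma charLe_iff (c d : Char) : (c ≤ d) ↔ c.toNat ≤ d.toNat := by
  rw [Char.le_def, UInt32.le_iff_toNat_le]; rfl

lemma singleton_lt_singleton (a b : Char) : ([a] < [b]) ↔ a < b := by
  constructor
  · intro h
    cases h with
    | rel h => exact h
    | cons h => cases h
  · intro h
    exact List.Lex.rel h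

lemma singleton_le_singleton (a b : Char) : ([a] ≤ [b]) ↔ a ≤ b := by
  rw [le_iff_lt_or_eq, le_iff_lt_or_eq, singleton_lt_singleton]
  simp

lemma toNat_ofNat_small (x : Nat) (h : x ≤ 300) : (Char.ofNat x).toNat = x := by
  rw [Char.toNat_ofNat, if_pos]
  exact Or.inl (by omega)

lemma pySetD_eq_set {α : Type} (xs : List α) (i : Int) (v : α)
    (h0 : 0 ≤ i) (h1 : i < xs.length) :
    PySem.List.pySetD xs i v = xs.set i.toNat v := by
  simp [PySem.List.pySetD, PySem.List.pySet?, PySem.List.pyIdx?, h0, h1]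

lemma pyGetD_append_len {α : Type} (pre : List α) (y : α) (ys : List α) (d : α) :
    PySem.List.pyGetD (pre ++ y :: ys) (pre.length : Int) d = y := by
  simp [PySem.List.pyGetD]

lemma take_succ_singleton (ds : List Char) (j : Nat) (hj : j < ds.length) :
    (ds.take (j+1)).map (fun c => ([c] : List Char))
      = (ds.take j).map (fun c => [c]) ++ [[ds.getD j '0']] := by
  have h := List.take_concat_get (l := ds) (i := j) hj
  rw [List.concat_eq_append] at h
  rw [← h, List.map_append, List.getD_eq_getElem ds '0' hj]
  simp

lemma loopInv (ds : List Char) (hdom : ∀ c ∈ ds, c.toNat ≤ 126) :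
    ∀ m, m < ds.length →
    ((List.range m).map (fun (k : Nat) => ((ds.length : Int) - 1) - (k : Int))).foldl roundedStep
        (ds.map (fun c => [c]))
      = (ds.take (ds.length - 1 - m)).map (fun c => [c])
        ++ [Char.ofNat ((ds.getD (ds.length - 1 - m) '0').toNat
              + carryF (ds.drop (ds.length - m)))]
          :: List.replicate m (['0'] : List Char) := by
  intro m
  induction m with
  | zero =>
    intro h0
    have hL : ds.length - 1 < ds.length := by omega
    simp only [List.range_zero, List.map_nil, List.foldl_nil, Nat.sub_zero,
      List.drop_length, carryF_nil, Nat.add_zero, List.replicate_zero]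
    rw [List.getD_eq_getElem ds '0' hL, Char.ofNat_toNat]
    have h := take_succ_singleton ds (ds.length - 1) hL
    rw [List.getD_eq_getElem ds '0' hL] at h
    rw [show ds.length - 1 + 1 = ds.length from by omega, List.take_length] at h
    exact h
  | succ m ih =>
    intro hm1
    have hm : m < ds.length := by omega
    rw [List.range_succ, List.map_append, List.foldl_append]
    simp only [List.map_cons, List.map_nil, List.foldl_cons, List.foldl_nil]
    rw [ih hm]
    have hLm : ds.length - m = (ds.length - 1 - m) + 1 := by omega
    rw [hLm]
    set L := ds.length with hLdef
    set j := L - 1 - m with hjdef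
    have hjL : j < L := by omega
    have hj1 : 1 ≤ j := by omega
    rw [show L - 1 - (m + 1) = j - 1 from by omega, show L - (m + 1) = j from by omega]
    set pre := (ds.take j).map (fun c => ([c] : List Char)) with hpredef
    set rest := List.replicate m (['0'] : List Char) with hrestdef
    set x := (ds.getD j '0').toNat + carryF (ds.drop (j + 1)) with hxdef
    set e : List Char := [Char.ofNat x] with hedef
    have hplen : pre.length = j := by
      rw [hpredef]; simp [hjdef, hLdef]; omega
    have hSlen : (pre ++ e :: rest).length = L := by
      simp [hplen, hrestdef, hjdef]; omega
    have hidx : ((L : Int) - 1 - (m : Int)) = ((pre.length : Nat) : Int) := by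
      rw [hplen]; push_cast [hjdef]; omega
    have hd126 : (ds.getD j '0').toNat ≤ 126 := by
      rw [List.getD_eq_getElem ds '0' hjL]
      exact hdom _ (List.getElem_mem hjL)
    have hc1 : carryF (ds.drop (j + 1)) ≤ 1 := carryF_le_one _
    have hxval : (Char.ofNat x).toNat = x := toNat_ofNat_small x (by omega)
    have hgete : PySem.List.pyGetD (pre ++ e :: rest) ((L : Int) - 1 - (m : Int)) [] = e := by
      rw [hidx]; exact pyGetD_append_len pre e rest []
    have hcond : (['5'] ≤ e) ↔ 53 ≤ x := by
      rw [hedef, singleton_le_singleton, charLe_iff, hxval]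
      constructor <;> intro h <;> simpa using h
    -- goal entry value: carryF (ds.drop j)
    have hdropj : ds.drop j = ds.getD j '0' :: ds.drop (j + 1) := by
      rw [List.getD_eq_getElem ds '0' hjL]
      exact List.drop_eq_getElem_cons hjL
    have hcarryj : carryF (ds.drop j) = if 53 ≤ x then 1 else 0 := by
      rw [hdropj, carryF_cons, hxdef]
    -- decompose pre
    have hpre2 : pre = (ds.take (j - 1)).map (fun c => [c]) ++ [[ds.getD (j - 1) '0']] := by
      have h := take_succ_singleton ds (j - 1) (by omega)
      rw [show j - 1 + 1 = j from by omega] at h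
      rw [hpredef, h]
    simp only [roundedStep]
    by_cases hc : 53 ≤ x
    · rw [hgete, if_pos (hcond.mpr hc)]
      have hidx1 : ((L : Int) - 1 - (m : Int) - 1) = ((j - 1 : Nat) : Int) := by push_cast; omega
      have hpreget : PySem.List.pyGetD (pre ++ e :: rest) ((L : Int) - 1 - (m : Int) - 1) []
          = [ds.getD (j - 1) '0'] := by
        rw [hidx1, PySem.List.pyGetD_natCast, List.getD_append _ _ _ (j - 1) (by rw [hplen]; omega),
          hpredef, List.getD_eq_getElem _ _ (by simp [hLdef] <;> omega), List.getElem_map,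
          List.getElem_take, ← List.getD_eq_getElem ds '0' (show j - 1 < ds.length from by omega)]
      rw [hpreget]
      rw [show pyChrOrdSucc [ds.getD (j - 1) '0'] = [Char.ofNat ((ds.getD (j - 1) '0').toNat + 1)] from rfl]
      rw [show ((L : Int) - 1 - (m : Int) - 1) = ((j - 1 : Nat) : Int) from hidx1]
      rw [pySetD_eq_set (pre ++ e :: rest) (((j - 1 : Nat) : Int)) _ (by push_cast; omega)
        (by rw [hSlen]; push_cast; omega), Int.toNat_natCast]
      rw [List.set_append_left _ _ (by rw [hplen]; omega)]
      have hpreset : pre.set (j - 1) [Char.ofNat ((ds.getD (j - 1) '0').toNat + 1)]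
          = (ds.take (j - 1)).map (fun c => [c]) ++ [[Char.ofNat ((ds.getD (j - 1) '0').toNat + 1)]] := by
        rw [hpre2, List.set_append_right _ _ (by simp [hLdef] <;> omega)]
        congr 1
        have : j - 1 - ((ds.take (j - 1)).map (fun c => ([c] : List Char))).length = 0 := by
          simp [hLdef] <;> omega
        rw [this, List.set_cons_zero]
      rw [hpreset]
      have houtlen : (((ds.take (j - 1)).map (fun c => ([c] : List Char))
          ++ [[Char.ofNat ((ds.getD (j - 1) '0').toNat + 1)]]) ++ e :: rest).length = L := by
        simp [hrestdef, hLdef] <;> omega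
      rw [pySetD_eq_set _ _ _ (by omega) (by rw [houtlen]; push_cast; omega)]
      have htn : ((L : Int) - 1 - (m : Int)).toNat = j := by omega
      rw [htn]
      have hlen3 : ((ds.take (j - 1)).map (fun c => ([c] : List Char))
          ++ [[Char.ofNat ((ds.getD (j - 1) '0').toNat + 1)]]).length = j := by
        simp [hLdef] <;> omega
      rw [List.set_append_right j _ (by rw [hlen3])]
      rw [hlen3, Nat.sub_self, List.set_cons_zero]
      rw [hcarryj, if_pos hc]
      simp [List.replicate_succ, hrestdef]
    · rw [if_neg (fun hh => hc (hcond.mp (hgete ▸ hh)))]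
      -- outer set only
      rw [pySetD_eq_set _ _ _ (by omega) (by rw [hSlen]; push_cast; omega)]
      have htn : ((L : Int) - 1 - (m : Int)).toNat = j := by omega
      rw [htn, List.set_append_right j _ (by omega)]
      rw [hplen, Nat.sub_self]
      simp only [List.set_cons_zero]
      rw [hpre2, hcarryj, if_neg hc, Nat.add_zero]
      rw [List.getD_eq_getElem ds '0' (show j - 1 < ds.length from by omega), Char.ofNat_toNat]
      simp [List.replicate_succ, hrestdef]


-- ' '.join(n).split() is exactly the non-whitespace characters of n, each as a 1-char string
lemma go_join (cs : List Char) (acc : List (List Char)) :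
    PySem.Chars.split₀.go (PySem.Chars.join [' '] (cs.map (fun c => [c]))) [] acc
      = acc.reverse ++ (cs.filter (fun c => !PySem.Chars.isspace c)).map (fun c => [c]) := by
  induction cs generalizing acc with
  | nil => simp [PySem.Chars.join, List.intercalate, PySem.Chars.split₀.go]
  | cons c cs ih =>
    cases cs with
    | nil =>
      have h1 : PySem.Chars.join [' '] ((c :: ([] : List Char)).map (fun c => [c])) = [c] := by
        simp [PySem.Chars.join, List.intercalate]
      rw [h1, List.filter_cons]
      by_cases hc : PySem.Chars.isspace c = true <;>
        simp [PySem.Chars.split₀.go, hc]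
    | cons c' cs' =>
      have h1 : PySem.Chars.join [' '] ((c :: c' :: cs').map (fun c => [c]))
          = c :: ' ' :: PySem.Chars.join [' '] ((c' :: cs').map (fun c => [c])) := by
        simp [PySem.Chars.join, List.intercalate]
      rw [h1, List.filter_cons]
      by_cases hc : PySem.Chars.isspace c = true
      · have s1 : PySem.Chars.split₀.go (c :: ' ' :: PySem.Chars.join [' '] ((c' :: cs').map (fun c => [c]))) [] acc
            = PySem.Chars.split₀.go (PySem.Chars.join [' '] ((c' :: cs').map (fun c => [c]))) [] acc := by
          simp [PySem.Chars.split₀.go, hc, show PySem.Chars.isspace ' ' = true from by decide]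
        rw [s1, ih, hc]; simp
      · have s1 : PySem.Chars.split₀.go (c :: ' ' :: PySem.Chars.join [' '] ((c' :: cs').map (fun c => [c]))) [] acc
            = PySem.Chars.split₀.go (PySem.Chars.join [' '] ((c' :: cs').map (fun c => [c]))) [] ([c] :: acc) := by
          simp [PySem.Chars.split₀.go, hc, show PySem.Chars.isspace ' ' = true from by decide]
        rw [s1, ih]; simp [hc]

lemma split_join (cs : List Char) :
    PySem.Chars.split₀ (PySem.Chars.join [' '] (cs.map (fun c => [c])))
      = (cs.filter (fun c => !PySem.Chars.isspace c)).map (fun c => [c]) := by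
  simpa [PySem.Chars.split₀] using go_join cs []

-- ''.join(cs.split()) is the non-whitespace characters of cs, in order
lemma go_flatten (cs cur : List Char) (acc : List (List Char)) :
    (PySem.Chars.split₀.go cs cur acc).flatten
      = acc.reverse.flatten ++ cur.reverse ++ cs.filter (fun c => !PySem.Chars.isspace c) := by
  induction cs generalizing cur acc with
  | nil =>
    by_cases hcur : cur.isEmpty = true <;>
      simp_all [PySem.Chars.split₀.go, List.isEmpty_iff]
  | cons c cs ih =>
    rw [List.filter_cons]
    by_cases hc : PySem.Chars.isspace c = true
    · by_cases hcur : cur.isEmpty = true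
      · simp only [PySem.Chars.split₀.go, hc, hcur, if_true]
        rw [ih, List.isEmpty_iff.mp hcur]
        simp [hc]
      · simp only [PySem.Chars.split₀.go, hc, hcur, if_true]
        rw [if_neg Bool.false_ne_true, ih]
        simp [hc]
    · simp only [PySem.Chars.split₀.go, hc]
      rw [if_neg Bool.false_ne_true, ih]
      simp [hc]

lemma flatten_split₀ (cs : List Char) :
    (PySem.Chars.split₀ cs).flatten = cs.filter (fun c => !PySem.Chars.isspace c) := by
  simpa [PySem.Chars.split₀] using go_flatten cs [] []

lemma char_toNat_ne_of_ne (c d : Char) (h : c ≠ d) : c.toNat ≠ d.toNat := by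
  intro he
  exact h (Char.ext (UInt32.toNat_inj.mp he))

-- the right-to-left carry fold equals the drop-leading-'4's closed form
lemma carryF_eq_dropWhile (l : List Char) :
    carryF l = (match l.dropWhile (fun c => c == '4') with
      | [] => 0
      | c :: _ => if '5' ≤ c then 1 else 0) := by
  induction l with
  | nil => rfl
  | cons c l ih =>
    rw [carryF_cons, List.dropWhile_cons]
    by_cases hc : c = '4'
    · subst hc
      simp only [beq_self_eq_true, if_true]
      rw [← ih]
      have := carryF_le_one l
      have h52 : ('4' : Char).toNat = 52 := by decide
      rw [h52]
      split_ifs <;> omega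
    · have hbe : (c == '4') = false := by simp [hc]
      simp only [hbe, Bool.false_eq_true, if_false]
      have hne : c.toNat ≠ 52 := by
        have := char_toNat_ne_of_ne c '4' hc
        simpa using this
      have h5 : ('5' ≤ c) ↔ 53 ≤ c.toNat := by
        rw [charLe_iff]; constructor <;> intro h <;> simpa using h
      have := carryF_le_one l
      rw [show (if '5' ≤ c then (1:Nat) else 0) = if 53 ≤ c.toNat then 1 else 0 from by
        simp [h5]]
      split_ifs <;> omega

lemma pyRange_down (a : Int) :
    PySem.List.pyRange a 0 (-1) = (List.range a.toNat).map (fun (k : Nat) => a - (k : Int)) := by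
  unfold PySem.List.pyRange
  norm_num
  by_cases h : 0 < a
  · rw [if_pos h]
    apply List.map_congr_left
    intro k _
    ring
  · rw [if_neg h]
    have : a.toNat = 0 := by omega
    rw [this]
    simp

lemma join_nil_flatten (l : List (List Char)) : PySem.Chars.join [] l = l.flatten := by
  induction l with
  | nil => rfl
  | cons x l ih =>
    have h : PySem.Chars.join [] (x :: l) = x ++ PySem.Chars.join [] l := by
      cases l <;> simp [PySem.Chars.join, List.intercalate]
    rw [h, ih, List.flatten_cons]

lemma flatten_replicate_zero (m : Nat) :
    (List.replicate m (['0'] : List Char)).flatten = List.replicate m '0' := by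
  induction m with
  | zero => rfl
  | succ k ih => simp [List.replicate_succ, ih]

lemma headD_eq_getD (l : List Char) : l.headD '0' = l.getD 0 '0' := by
  cases l <;> rfl

-- ===== VERDICT (by name: the statement is the Claim_ definition above) =====
theorem rounded_spec : Claim_equal_rounded := by
  unfold Claim_equal_rounded
  intro n hdom hpre
  unfold Spec_rounded
  obtain ⟨hsome, hany⟩ := hpre
  unfold rounded rounded_alt
  cases hv : PySem.Int.ofStr? n with
  | none => rfl
  | some v =>
    dsimp only
    by_cases hv10 : v ≤ 10
    · rw [if_pos hv10, if_pos hv10]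
    · rw [if_neg hv10, if_neg hv10]
      set ds := n.toList.filter (fun c => !PySem.Chars.isspace c) with hdsdef
      have hdom' : ∀ c ∈ ds, c.toNat ≤ 126 := by
        intro c hc
        have hcn : c ∈ n.toList := List.mem_of_mem_filter hc
        have hall : pvDomChar c = true := by
          have := hdom
          unfold Dom_rounded pvDomStr at this
          exact (List.all_eq_true.mp this) c hcn
        simp [pvDomChar] at hall
        omega
      have hne : ds ≠ [] := by
        obtain ⟨c, hc, hcs⟩ := List.any_eq_true.mp hany
        exact List.ne_nil_of_mem (List.mem_filter.mpr ⟨hc, hcs⟩)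
      have hL1 : 1 ≤ ds.length := List.length_pos_of_ne_nil hne
      -- B's cleaned string: ''.join(n.split()) = ds
      have hdsB : PySem.Chars.join [] (PySem.Chars.split₀ n.toList) = ds := by
        rw [join_nil_flatten, flatten_split₀]
      rw [hdsB]
      -- A's cleaned list
      rw [split_join n.toList]
      rw [show (n.toList.filter (fun c => !PySem.Chars.isspace c)) = ds from rfl]
      have hlen : ((ds.map (fun c => ([c] : List Char))).length : Int) = (ds.length : Int) := by
        simp
      rw [hlen]
      rw [pyRange_down ((ds.length : Int) - 1)]
      have htn : ((ds.length : Int) - 1).toNat = ds.length - 1 := by omega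
      rw [htn]
      rw [loopInv ds hdom' (ds.length - 1) (by omega)]
      have h00 : ds.length - 1 - (ds.length - 1) = 0 := by omega
      have h01 : ds.length - (ds.length - 1) = 1 := by omega
      rw [h00, h01]
      simp only [List.take_zero, List.map_nil, List.nil_append]
      set x0 : Nat := (ds.getD 0 '0').toNat + carryF (ds.drop 1) with hx0def
      have hd126 : (ds.getD 0 '0').toNat ≤ 126 := by
        rw [List.getD_eq_getElem ds '0' (by omega)]
        exact hdom' _ (List.getElem_mem (by omega))
      have hc1 : carryF (ds.drop 1) ≤ 1 := carryF_le_one _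
      have hxval : (Char.ofNat x0).toNat = x0 := toNat_ofNat_small x0 (by omega)
      -- B's carry (dropWhile-'4' form) is carryF (ds.drop 1)
      have hslice : PySem.List.slice ds (some 1) none = ds.drop 1 := by
        simpa using PySem.List.slice_from_one (xs := ds)
      rw [hslice]
      rw [show (match (ds.drop 1).dropWhile (fun c => c == '4') with
            | [] => (0 : Nat)
            | c :: _ => if '5' ≤ c then 1 else 0) = carryF (ds.drop 1) from
        (carryF_eq_dropWhile (ds.drop 1)).symm]
      rw [headD_eq_getD]
      have hget0 : PySem.List.pyGetD
          ([Char.ofNat x0] :: List.replicate (ds.length - 1) (['0'] : List Char)) 0 [] = [Char.ofNat x0] :=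
        PySem.List.pyGetD_zero_cons _ _ _
      rw [hget0]
      have hcond : ((['9'] : List Char) < [Char.ofNat x0]) ↔ '9' < Char.ofNat x0 :=
        singleton_lt_singleton _ _
      by_cases hc : '9' < Char.ofNat x0
      · rw [if_pos (hcond.mpr hc), if_pos hc]
        rw [pySetD_eq_set _ 0 _ (by omega) (by simp)]
        simp only [Int.toNat_zero, List.set_cons_zero]
        rw [join_nil_flatten, List.flatten_cons, flatten_replicate_zero]
      · rw [if_neg (fun hh => hc (hcond.mp hh)), if_neg hc]
        rw [join_nil_flatten, List.flatten_cons, flatten_replicate_zero]
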